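-- pv_equiv track=rewrite | github.com/cybermouflons/CCSC-CTF-2021 | stego/how-convenient/setup/flag2fens.py | char2fen
-- ===== SOURCE A (Python) =====
-- def char2fen(c):
--     s = ''
--     k = 0
--     for i in range(8):
--         if not c & 1:
--             k += 1
--         else:
--             if (k):
--                 s = s + str(k)
--             k = 0
--             s = s + 'P'
--         c >>= 1
--     if (k):
--         s = s + str(k)
--
--     return s[::-1]
-- ===== SOURCE B (Python) =====
-- from itertools import groupby
--
-- def char2fen(c):
--     out = []
--     for bit, grp in groupby(format(c & 0xFF, '08b')):
--         n = len(list(grp))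
--         out.append('P' * n if bit == '1' else str(n))
--     return ''.join(out)
-- ===== Notes on version B (the rewrite author's own statement) =====
-- stated objective: idiomatic
-- what changed: Replaces A's per-bit shift loop with a manual zero counter, string accumulator and final reversal by building the eight-bit MSB-first binary string of the masked byte once and run-length-encoding it with itertools.groupby, emitting the result in order with no reversal.
import Mathlib
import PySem

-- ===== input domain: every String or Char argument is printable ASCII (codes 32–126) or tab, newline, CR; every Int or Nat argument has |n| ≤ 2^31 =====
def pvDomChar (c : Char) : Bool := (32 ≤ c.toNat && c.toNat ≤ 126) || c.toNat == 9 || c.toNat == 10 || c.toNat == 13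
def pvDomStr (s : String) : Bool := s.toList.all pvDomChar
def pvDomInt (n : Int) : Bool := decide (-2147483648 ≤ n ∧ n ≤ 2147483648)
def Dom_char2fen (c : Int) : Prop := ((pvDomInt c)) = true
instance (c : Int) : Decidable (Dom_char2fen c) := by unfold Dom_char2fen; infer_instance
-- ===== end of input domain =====

-- B re-implements A's bit-shift loop (manual zero counter, accumulate then reverse) as a
-- run-length encoding of the MSB-first 8-bit string of c & 0xFF (no final reversal): objective "idiomatic".

-- ===== PORT A =====
-- loop body of `for i in range(8)`: state (s, k, c)
def fenStep (st : String × Int × Int) (_i : Int) : String × Int × Int :=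
  let s := st.1
  let k := st.2.1
  let c := st.2.2
  if PySem.Int.band c 1 == 0 then
    (s, k + 1, c >>> (1 : Nat))
  else
    ((if k ≠ 0 then s ++ PySem.Int.toStr k else s) ++ "P", 0, c >>> (1 : Nat))

def char2fen (c : Int) : String :=
  let st := (PySem.List.pyRange 0 8 1).foldl fenStep ("", 0, c)
  let s := if st.2.1 ≠ 0 then st.1 ++ PySem.Int.toStr st.2.1 else st.1
  (PySem.Str.slice? s none none (-1)).getD ""   -- s[::-1]; step is -1, never none

-- ===== PORT B =====
-- format(m, '08b') for 0 ≤ m < 256: binary digits left-padded with '0' to width 8 (exact: m ≥ 0 has no sign)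
def pad8 (m : Int) : List Char :=
  let ds := PySem.Int.toBinChars m
  List.replicate (8 - ds.length) '0' ++ ds

-- itertools.groupby plus len(list(grp)): runs of equal chars as (key, length)
def groupAux (b : Char) (n : Nat) : List Char → List (Char × Nat)
  | [] => [(b, n)]
  | x :: xs => if x == b then groupAux b (n + 1) xs else (b, n) :: groupAux x 1 xs

def groupRuns : List Char → List (Char × Nat)
  | [] => []
  | x :: xs => groupAux x 1 xs

def char2fen_alt (c : Int) : String :=
  -- c & 0xFF masks to the low 8 bits; exact: Python `&` is infinite two's complement, so c & 0xFF = c mod 256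
  let m := PySem.Int.mod c 256
  let runs := groupRuns (pad8 m)
  String.join (runs.map (fun r =>
    if r.1 == '1' then String.ofList (List.replicate r.2 'P')   -- 'P' * n
    else PySem.Int.toStr (Int.ofNat r.2)))                  -- str(n)

-- ===== PRECONDITION & SPEC =====
def Spec_char2fen (c : Int) (out : String) : Prop := out = char2fen_alt c
instance (c : Int) (out : String) : Decidable (Spec_char2fen c out) := by unfold Spec_char2fen; infer_instance

-- ===== CLAIM (what is proved, stated in full; the proofs are below) =====
def Claim_equal_char2fen : Prop := ∀ (c : Int), Dom_char2fen c → Spec_char2fen c (char2fen c)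

-- ===== LEMMAS AND PROOFS =====

theorem band_one_emod (a : Int) : PySem.Int.band a 1 = a % 2 := by
  rw [PySem.Int.band_one, show PySem.Int.mod a 2 = a.fmod 2 from rfl, Int.fmod_eq_emod]; simp

theorem shiftRight_one_eq (a : Int) : a >>> (1 : Nat) = a / 2 := by
  rw [Int.shiftRight_eq_div_pow]; norm_num

theorem half_emod (r q m : Int) : (r + q * m * 2) / 2 % m = r / 2 % m := by
  rw [Int.add_mul_ediv_right _ _ (by norm_num : (2:Int) ≠ 0)]
  rw [mul_comm q m, Int.add_mul_emod_self_left]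

theorem ediv_two_emod_congr (n : Nat) (c c' : Int) (h : c % 2 ^ (n + 1) = c' % 2 ^ (n + 1)) :
    c / 2 % 2 ^ n = c' / 2 % 2 ^ n := by
  have key : ∀ a : Int, a / 2 % 2 ^ n = (a % 2 ^ (n + 1)) / 2 % 2 ^ n := by
    intro a
    conv_lhs => rw [← Int.emod_add_mul_ediv a (2 ^ (n + 1))]
    rw [show a % 2 ^ (n + 1) + 2 ^ (n + 1) * (a / 2 ^ (n + 1))
          = a % 2 ^ (n + 1) + (a / 2 ^ (n + 1)) * 2 ^ n * 2 by ring]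
    exact half_emod _ _ _
  rw [key c, key c', h]

theorem emod_two_congr (n : Nat) (c c' : Int) (h : c % 2 ^ (n + 1) = c' % 2 ^ (n + 1)) :
    c % 2 = c' % 2 := by
  have hd : (2 : Int) ∣ 2 ^ (n + 1) := dvd_pow_self 2 (Nat.succ_ne_zero n)
  rw [← Int.emod_emod_of_dvd c hd, h, Int.emod_emod_of_dvd c' hd]

-- the fold's output string and counter depend on c only through c mod 2^(number of remaining steps)
theorem foldl_fenStep_congr (l : List Int) : ∀ (s : String) (k c c' : Int),
    c % 2 ^ l.length = c' % 2 ^ l.length →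
    (l.foldl fenStep (s, k, c)).1 = (l.foldl fenStep (s, k, c')).1 ∧
    (l.foldl fenStep (s, k, c)).2.1 = (l.foldl fenStep (s, k, c')).2.1 := by
  induction l with
  | nil => intro s k c c' _; exact ⟨rfl, rfl⟩
  | cons i t ih =>
    intro s k c c' h
    simp only [List.length_cons] at h
    have hbit : PySem.Int.band c 1 = PySem.Int.band c' 1 := by
      rw [band_one_emod, band_one_emod]; exact emod_two_congr _ _ _ h
    have hnext : (c >>> (1:Nat)) % 2 ^ t.length = (c' >>> (1:Nat)) % 2 ^ t.length := by
      rw [shiftRight_one_eq, shiftRight_one_eq]; exact ediv_two_emod_congr _ _ _ h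
    simp only [List.foldl_cons, fenStep, hbit]
    split <;> exact ih _ _ _ _ hnext

theorem char2fen_emod (c : Int) : char2fen c = char2fen (c % 256) := by
  have hlen : (PySem.List.pyRange 0 8 1).length = 8 := by decide
  have h : c % 2 ^ (PySem.List.pyRange 0 8 1).length
         = (c % 256) % 2 ^ (PySem.List.pyRange 0 8 1).length := by
    rw [hlen]
    norm_num [Int.emod_emod_of_dvd]
  obtain ⟨h1, h2⟩ := foldl_fenStep_congr (PySem.List.pyRange 0 8 1) "" 0 c (c % 256) h
  simp only [char2fen, h1, h2]

theorem char2fen_alt_emod (c : Int) : char2fen_alt c = char2fen_alt (c % 256) := by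
  have : PySem.Int.mod c 256 = PySem.Int.mod (c % 256) 256 := by
    show c.fmod 256 = (c % 256).fmod 256
    rw [Int.fmod_eq_emod, Int.fmod_eq_emod]
    norm_num [Int.emod_emod_of_dvd]
  simp only [char2fen_alt, this]

set_option maxRecDepth 4096 in
theorem all256 : ∀ i : Fin 256, char2fen (i.val : Int) = char2fen_alt (i.val : Int) := by decide

-- ===== VERDICT (by name: the statement is the Claim_ definition above) =====
theorem char2fen_spec : Claim_equal_char2fen := by
  intro c _
  show char2fen c = char2fen_alt c
  rw [char2fen_emod, char2fen_alt_emod]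
  have h0 : (0:Int) ≤ c % 256 := Int.emod_nonneg c (by norm_num)
  have h1 : c % 256 < 256 := Int.emod_lt_of_pos c (by norm_num)
  have := all256 ⟨(c % 256).toNat, by omega⟩
  simpa [Int.toNat_of_nonneg h0] using this
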